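-- pv_equiv track=rewrite | github.com/trungcoding/Python_execise | TextDAG/my_python_script copy.py | solution
-- ===== SOURCE A (Python) =====
-- def generate_strings(map, index, current, strings):
--     if index == len(map):
--         strings.append(''.join(current))
--         return
--     for letter in map[index]:
--         current[index] = letter
--         generate_strings(map, index + 1, current, strings)
--
-- def solution(P, Q):
--     map = [[P[i], Q[i]] for i in range(len(P))]
--     strings = []
--     generate_strings(map, 0, [''] * len(P), strings)
--     min_unique = float('inf')
--     for i in strings:
--         unique = len(set(i))
--         if unique < min_unique:
--             min_unique = unique
--     return min_unique
-- ===== SOURCE B (Python) =====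
-- def solution(P, Q):
--     # Fused branch-and-prune search: pick P[i] or Q[i] per index, carrying the set of
--     # chosen characters; if either character is already chosen, choosing it again is
--     # always at least as good, so that branch alone is explored.
--     pairs = list(zip(P, Q))
--
--     def best(pairs, chosen):
--         if not pairs:
--             return len(chosen)
--         a, b = pairs[0]
--         rest = pairs[1:]
--         if a in chosen or b in chosen:
--             return best(rest, chosen)
--         if a == b:
--             return best(rest, chosen | {a})
--         return min(best(rest, chosen | {a}), best(rest, chosen | {b}))
--
--     return best(pairs, frozenset())
-- ===== Notes on version B (the rewrite author's own statement) =====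
-- stated objective: faster
-- what changed: A materializes all 2^n candidate strings via recursive generation and then scans them counting distinct characters; B fuses the search into one recursion over the (P[i],Q[i]) pairs carrying the set of already-chosen characters, recursing once (no branch) whenever either character of a pair is already chosen or the two are equal, which is exact because the result is monotone in the chosen set.
import Mathlib
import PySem

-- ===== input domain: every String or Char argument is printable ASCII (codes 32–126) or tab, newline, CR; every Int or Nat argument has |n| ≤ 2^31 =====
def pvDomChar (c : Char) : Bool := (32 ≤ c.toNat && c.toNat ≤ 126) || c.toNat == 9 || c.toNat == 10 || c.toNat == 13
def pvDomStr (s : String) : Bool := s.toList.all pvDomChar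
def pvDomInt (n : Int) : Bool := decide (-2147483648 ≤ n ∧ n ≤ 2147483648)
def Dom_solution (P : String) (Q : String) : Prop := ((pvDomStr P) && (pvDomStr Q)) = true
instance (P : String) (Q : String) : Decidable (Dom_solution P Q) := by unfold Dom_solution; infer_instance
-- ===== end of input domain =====

-- B replaces A's generate-all-2^n-strings-then-scan with a fused branch-and-prune search
-- over the pairs (P[i],Q[i]) carrying the set of chosen characters (alternative decomposition;
-- prunes whenever a pair's character was already chosen).

-- ===== PORT A =====
-- generate_strings(map, index, current, strings); Python strings are carried as List Char
-- (PySem convention), ''.join(current) is List.flatten, current[index] = letter is List.set.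
mutual
def genA (m : List (List Char)) (index : Nat) (current : List (List Char)) (strings : List (List Char)) : List (List Char) :=
  if index = m.length then strings ++ [current.flatten]
  else if h : index < m.length then genAFor m index h current m[index] strings
  else strings  -- unreachable totality guard: index never exceeds m.length
termination_by (m.length - index, 1, 0)
def genAFor (m : List (List Char)) (index : Nat) (h : index < m.length) (current : List (List Char)) (letters : List Char) (strings : List (List Char)) : List (List Char) :=
  match letters with
  | [] => strings
  | letter :: rest => genAFor m index h current rest (genA m (index + 1) (current.set index [letter]) strings)
termination_by (m.length - index, 0, letters.length)
end

-- the final min loop over strings; `none` plays float('inf')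
def minLoop (strings : List (List Char)) : Option Int :=
  strings.foldl (fun min_unique i =>
    let unique : Int := ((PySem.Set.ofList i).length : Int)
    match min_unique with
    | none => some unique
    | some v => if unique < v then some unique else some v) none

def solution (P : String) (Q : String) : Int :=
  let p := P.toList
  let q := Q.toList
  -- map = [[P[i], Q[i]] for i in range(len(P))]; both indices are in range under Pre_solution
  let m := (List.range p.length).map (fun i => [p.getD i ' ', q.getD i ' '])
  let strings := genA m 0 (List.replicate p.length []) []
  -- strings is never empty, so the fold always yields a value (float('inf') is unreachable)
  (minLoop strings).getD 0

-- ===== PORT B =====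
def bestB (pairs : List (Char × Char)) (chosen : PySem.Set Char) : Int :=
  match pairs with
  | [] => PySem.Set.len chosen
  | (a, b) :: rest =>
    if PySem.Set.contains chosen a || PySem.Set.contains chosen b then
      bestB rest chosen
    else if a = b then
      bestB rest (PySem.Set.add chosen a)
    else
      min (bestB rest (PySem.Set.add chosen a)) (bestB rest (PySem.Set.add chosen b))

def solution_alt (P : String) (Q : String) : Int :=
  bestB (P.toList.zip Q.toList) PySem.Set.empty

-- ===== PRECONDITION & SPEC =====
-- A indexes Q at every position of P, so it raises IndexError when Q is shorter than P;
-- those inputs are excluded (A returns on every other input).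
def Pre_solution (P : String) (Q : String) : Prop := P.toList.length ≤ Q.toList.length
instance (P : String) (Q : String) : Decidable (Pre_solution P Q) := by unfold Pre_solution; infer_instance
def pvWitness_solution : String × String := ("ab", "ba")

def Spec_solution (P : String) (Q : String) (out : Int) : Prop := out = solution_alt P Q
instance (P : String) (Q : String) (out : Int) : Decidable (Spec_solution P Q out) := by unfold Spec_solution; infer_instance

-- ===== CLAIM (what is proved, stated in full; the proofs are below) =====
def Claim_equal_solution : Prop := ∀ (P : String) (Q : String), Dom_solution P Q → Pre_solution P Q → Spec_solution P Q (solution P Q)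

-- ===== LEMMAS AND PROOFS =====

-- all 2^n combination strings, in A's generation order
def combos : List (List Char) → List (List Char)
  | [] => [[]]
  | cs :: rest => cs.flatMap (fun c => (combos rest).map (c :: ·))

-- mathematical reference: minimum over all choices, carrying the chosen set
def M (S : PySem.Set Char) : List (Char × Char) → Int
  | [] => (S.length : Int)
  | (a, b) :: rest => min (M (PySem.Set.add S a) rest) (M (PySem.Set.add S b) rest)

-- the distinct-character count of a selection, started from set S
def gsel (S : PySem.Set Char) (sel : List Char) : Int := ((sel.foldl PySem.Set.add S).length : Int)

-- A's min-update step on the Option accumulator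
def ostep (o : Option Int) (u : Int) : Option Int :=
  match o with
  | none => some u
  | some v => if u < v then some u else some v

theorem ostep_ostep (o : Option Int) (m1 m2 : Int) : ostep (ostep o m1) m2 = ostep o (min m1 m2) := by
  cases o <;> simp only [ostep, min_def] <;> split_ifs <;> simp_all <;> omega

theorem minLoop_eq (l : List (List Char)) :
    minLoop l = l.foldl (fun o i => ostep o (gsel PySem.Set.empty i)) none := rfl

theorem combos_fold : ∀ (pairs : List (Char × Char)) (S : PySem.Set Char) (o : Option Int),
    (combos (pairs.map (fun ab => [ab.1, ab.2]))).foldl (fun o sel => ostep o (gsel S sel)) o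
      = ostep o (M S pairs) := by
  intro pairs
  induction pairs with
  | nil => intro S o; simp [combos, M, gsel]
  | cons ab rest ih =>
    intro S o
    obtain ⟨a, b⟩ := ab
    have hsel : ∀ (c : Char) (sel : List Char) (S : PySem.Set Char),
        gsel S (c :: sel) = gsel (PySem.Set.add S c) sel := fun _ _ _ => rfl
    simp only [List.map_cons, combos, List.flatMap_cons, List.flatMap_nil, List.append_nil,
      List.foldl_append, List.foldl_map, hsel, ih, M]
    exact ostep_ostep o _ _

theorem take_set_flatten (current : List (List Char)) (index : Nat) (c : Char)
    (h : index < current.length) :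
    ((current.set index [c]).take (index + 1)).flatten = (current.take index).flatten ++ [c] := by
  rw [List.take_add_one]
  simp [List.take_set, h, List.set_eq_of_length_le]

theorem genA_eq (m : List (List Char)) : ∀ (k index : Nat) (current strings : List (List Char)),
    m.length - index = k → index ≤ m.length → current.length = m.length →
    genA m index current strings
      = strings ++ (combos (m.drop index)).map (fun suf => (current.take index).flatten ++ suf) := by
  intro k
  induction k with
  | zero =>
    intro index current strings hk hle hlen
    have hidx : index = m.length := by omega
    subst hidx
    rw [genA]
    simp [combos, List.take_of_length_le (le_of_eq hlen)]
  | succ j ih =>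
    intro index current strings hk hle hlen
    have hlt : index < m.length := by omega
    have hfor : ∀ (letters : List Char) (strings : List (List Char)),
        genAFor m index hlt current letters strings
          = strings ++ letters.flatMap (fun c =>
              (combos (m.drop (index + 1))).map (fun suf => (current.take index).flatten ++ c :: suf)) := by
      intro letters
      induction letters with
      | nil => intro strings; simp [genAFor]
      | cons c ls ihl =>
        intro strings
        rw [genAFor]
        rw [ih (index + 1) (current.set index [c]) strings (by omega) (by omega) (by simpa using hlen)]
        rw [ihl]
        have hc : index < current.length := by omega
        simp [take_set_flatten current index c hc, List.flatMap_cons, List.append_assoc]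
    rw [genA]
    have hne : ¬ index = m.length := by omega
    simp only [hne, if_false, hlt, dif_pos]
    rw [hfor]
    have hdrop : m.drop index = m[index] :: m.drop (index + 1) := List.drop_eq_getElem_cons hlt
    rw [hdrop]
    simp [combos, List.map_flatMap, Function.comp_def]

theorem m_eq (p q : List Char) (hle : p.length ≤ q.length) :
    (List.range p.length).map (fun i => [p.getD i ' ', q.getD i ' '])
      = (p.zip q).map (fun ab => [ab.1, ab.2]) := by
  apply List.ext_getElem
  · simp; omega
  · intro i h1 h2
    have hip : i < p.length := by simpa using h1
    have hiq : i < q.length := by omega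
    simp [List.getElem_zip, List.getD_eq_getElem?_getD, hip, hiq]

theorem M_mono : ∀ (pairs : List (Char × Char)) (S T : PySem.Set Char),
    S.Nodup → T.Nodup → S ⊆ T → M S pairs ≤ M T pairs := by
  intro pairs
  induction pairs with
  | nil =>
    intro S T hS hT hsub
    simp only [M]
    exact_mod_cast (List.subperm_of_subset hS hsub).length_le
  | cons ab rest ih =>
    intro S T hS hT hsub
    obtain ⟨a, b⟩ := ab
    have hadd : ∀ c : Char, PySem.Set.add S c ⊆ PySem.Set.add T c := by
      intro c x hx
      rcases (PySem.Set.mem_add S c x).1 hx with h | h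
      · exact (PySem.Set.mem_add T c x).2 (Or.inl (hsub h))
      · exact (PySem.Set.mem_add T c x).2 (Or.inr h)
    exact min_le_min
      (ih _ _ (PySem.Set.nodup_add S a hS) (PySem.Set.nodup_add T a hT) (hadd a))
      (ih _ _ (PySem.Set.nodup_add S b hS) (PySem.Set.nodup_add T b hT) (hadd b))

theorem subset_add (S : PySem.Set Char) (c : Char) : S ⊆ PySem.Set.add S c :=
  fun x hx => (PySem.Set.mem_add S c x).2 (Or.inl hx)

theorem bestB_eq_M : ∀ (pairs : List (Char × Char)) (S : PySem.Set Char),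
    S.Nodup → bestB pairs S = M S pairs := by
  intro pairs
  induction pairs with
  | nil => intro S _; rfl
  | cons ab rest ih =>
    intro S hS
    obtain ⟨a, b⟩ := ab
    rw [bestB]
    by_cases ha : a ∈ S
    · have hca : PySem.Set.contains S a = true := (PySem.Set.contains_iff S a).2 ha
      rw [hca]
      simp only [Bool.true_or, if_true]
      rw [ih S hS, M]
      rw [PySem.Set.add_of_mem ha]
      exact (min_eq_left (M_mono rest S _ hS (PySem.Set.nodup_add S b hS) (subset_add S b))).symm
    · by_cases hb : b ∈ S
      · have hcb : PySem.Set.contains S b = true := (PySem.Set.contains_iff S b).2 hb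
        have hca : PySem.Set.contains S a = false := by simpa using ha
        rw [hca, hcb]
        simp only [Bool.false_or, if_true]
        rw [ih S hS, M]
        rw [PySem.Set.add_of_mem hb]
        exact (min_eq_right (M_mono rest S _ hS (PySem.Set.nodup_add S a hS) (subset_add S a))).symm
      · have hcond : ¬ ((PySem.Set.contains S a || PySem.Set.contains S b) = true) := by
          simp [ha, hb]
        rw [if_neg hcond]
        by_cases hab : a = b
        · subst hab
          rw [if_pos rfl]
          rw [ih _ (PySem.Set.nodup_add S a hS), M, min_self]
        · rw [if_neg hab]
          rw [ih _ (PySem.Set.nodup_add S a hS), ih _ (PySem.Set.nodup_add S b hS), M]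

-- ===== VERDICT (by name: the statement is the Claim_ definition above) =====
theorem solution_spec : Claim_equal_solution := by
  intro P Q _ hpre
  unfold Spec_solution
  have hle : P.toList.length ≤ Q.toList.length := hpre
  have hsol : solution P Q = (minLoop (genA ((List.range P.toList.length).map
      (fun i => [P.toList.getD i ' ', Q.toList.getD i ' '])) 0
      (List.replicate P.toList.length []) [])).getD 0 := rfl
  have halt : solution_alt P Q = bestB (P.toList.zip Q.toList) PySem.Set.empty := rfl
  rw [hsol, halt, m_eq P.toList Q.toList hle]
  have hmlen : ((P.toList.zip Q.toList).map (fun ab => [ab.1, ab.2])).length = P.toList.length := by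
    rw [List.length_map, List.length_zip]; omega
  rw [genA_eq ((P.toList.zip Q.toList).map (fun ab => [ab.1, ab.2]))
      (((P.toList.zip Q.toList).map (fun ab => [ab.1, ab.2])).length) 0
      (List.replicate P.toList.length []) [] (by omega) (by omega)
      (by rw [List.length_replicate, hmlen])]
  simp only [List.drop_zero, List.take_zero, List.flatten_nil, List.nil_append, List.map_id']
  rw [minLoop_eq]
  rw [combos_fold (P.toList.zip Q.toList) PySem.Set.empty none]
  rw [bestB_eq_M (P.toList.zip Q.toList) PySem.Set.empty List.nodup_nil]
  rfl
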